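-- pv_equiv track=rewrite | github.com/kuri-dKB/shogi | train_policy.py | parse_hands
-- ===== SOURCE A (Python) =====
-- HAND_ORDER = ["P", "L", "N", "S", "G", "B", "R"]
--
-- def parse_hands(hands_part: str):
--     # hands: "-" or like "2Rb3p" etc
--     # returns dict counts for black(uppercase) and white(lowercase)
--     b = {k: 0 for k in HAND_ORDER}
--     w = {k: 0 for k in HAND_ORDER}
--     if hands_part == "-" or hands_part == "":
--         return b, w
--
--     i = 0
--     n = len(hands_part)
--     while i < n:
--         # optional number
--         j = i
--         while j < n and hands_part[j].isdigit():
--             j += 1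
--         cnt = 1
--         if j > i:
--             cnt = int(hands_part[i:j])
--         if j >= n:
--             raise ValueError(f"bad hands: {hands_part}")
--         pc = hands_part[j]
--         i = j + 1
--
--         base = pc.upper()
--         if base not in HAND_ORDER:
--             raise ValueError(f"bad hands piece: {pc} in {hands_part}")
--
--         if pc.isupper():
--             b[base] += cnt
--         else:
--             w[base] += cnt
--
--     return b, w
-- ===== SOURCE B (Python) =====
-- HAND_ORDER = ["P", "L", "N", "S", "G", "B", "R"]
--
-- def parse_hands(hands_part: str):
--     # single left-to-right pass with a pending digit buffer (no index arithmetic, no slicing)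
--     b = {k: 0 for k in HAND_ORDER}
--     w = {k: 0 for k in HAND_ORDER}
--     if hands_part == "-" or hands_part == "":
--         return b, w
--     buf = ""
--     for ch in hands_part:
--         if ch.isdigit():
--             buf += ch
--         else:
--             base = ch.upper()
--             if base not in HAND_ORDER:
--                 raise ValueError(f"bad hands piece: {ch} in {hands_part}")
--             cnt = int(buf) if buf else 1
--             if ch.isupper():
--                 b[base] += cnt
--             else:
--                 w[base] += cnt
--             buf = ""
--     if buf:
--         raise ValueError(f"bad hands: {hands_part}")
--     return b, w
-- ===== Notes on version B (the rewrite author's own statement) =====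
-- stated objective: idiomatic
-- what changed: Replaces A's nested index/while scan with slicing and int() on substrings by a single left-to-right for-loop over the characters that accumulates pending digits in a buffer and flushes it at each piece letter.
import Mathlib
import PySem

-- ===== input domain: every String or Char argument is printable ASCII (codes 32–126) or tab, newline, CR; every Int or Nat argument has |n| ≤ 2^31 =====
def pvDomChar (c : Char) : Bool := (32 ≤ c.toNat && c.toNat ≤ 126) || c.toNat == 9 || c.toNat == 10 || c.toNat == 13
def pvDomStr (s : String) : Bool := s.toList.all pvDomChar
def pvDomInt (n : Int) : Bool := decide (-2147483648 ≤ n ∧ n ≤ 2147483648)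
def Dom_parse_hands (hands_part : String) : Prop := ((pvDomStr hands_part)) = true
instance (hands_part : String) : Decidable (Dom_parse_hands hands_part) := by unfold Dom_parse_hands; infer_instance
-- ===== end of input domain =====

-- B replaces A's nested index/while scan with slicing by one character fold carrying a digit buffer (idiomatic, same cost).


-- ===== PORT A =====
def handOrder : List String := ["P", "L", "N", "S", "G", "B", "R"]

-- {k: 0 for k in HAND_ORDER}
def zeroHand : PySem.Dict String Int := handOrder.foldl (fun d k => d.insert k 0) PySem.Dict.empty

-- A's outer while loop over index i: ported as recursion on the remaining suffix of the character
-- list; the inner digit-scanning while loop + slice is the takeWhile/dropWhile split of that suffix.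
-- none = the ValueError raises (excluded by Pre_); (ofChars? ds).getD 1 is int(hands_part[i:j]),
-- whose getD default is unreachable since ds is a non-empty run of digits.
def loopA (cs : List Char) (b w : PySem.Dict String Int) :
    Option (PySem.Dict String Int × PySem.Dict String Int) :=
  if cs.isEmpty then some (b, w)
  else
    let ds := cs.takeWhile PySem.Chars.isdigit
    let cnt : Int := if ds.isEmpty then 1 else (PySem.Int.ofChars? ds).getD 1
    match h2 : cs.dropWhile PySem.Chars.isdigit with
    | [] => none
    | pc :: tail =>
      let base := String.mk [PySem.Chars.upperChar pc]
      if handOrder.contains base then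
        if PySem.Chars.isupper pc then loopA tail (b.modify base 0 (· + cnt)) w
        else loopA tail b (w.modify base 0 (· + cnt))
      else none
termination_by cs.length
decreasing_by
  all_goals
    have hle := List.length_dropWhile_le (p := PySem.Chars.isdigit) (l := cs)
    rw [h2] at hle; simp at hle ⊢; omega

def parse_hands (hands_part : String) : (List (String × Int)) × (List (String × Int)) :=
  let b := zeroHand
  let w := zeroHand
  if hands_part = "-" ∨ hands_part = "" then (b.items, w.items)
  else
    match loopA hands_part.toList b w with
    | some (b', w') => (b'.items, w'.items)
    | none => ([], [])  -- Python raises ValueError here; excluded by Pre_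

-- ===== PORT B =====
-- B's single for-loop over the characters, carrying the pending digit buffer buf;
-- none = B's ValueError (same raising inputs as A, excluded by Pre_).
def loopB (cs : List Char) (buf : List Char) (b w : PySem.Dict String Int) :
    Option (PySem.Dict String Int × PySem.Dict String Int) :=
  match cs with
  | [] => if buf.isEmpty then some (b, w) else none
  | c :: rest =>
    if PySem.Chars.isdigit c then loopB rest (buf ++ [c]) b w
    else
      let base := String.mk [PySem.Chars.upperChar c]
      if handOrder.contains base then
        let cnt : Int := if buf.isEmpty then 1 else (PySem.Int.ofChars? buf).getD 1
        if PySem.Chars.isupper c then loopB rest [] (b.modify base 0 (· + cnt)) w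
        else loopB rest [] b (w.modify base 0 (· + cnt))
      else none

def parse_hands_alt (hands_part : String) : (List (String × Int)) × (List (String × Int)) :=
  let b := zeroHand
  let w := zeroHand
  if hands_part = "-" ∨ hands_part = "" then (b.items, w.items)
  else
    match loopB hands_part.toList [] b w with
    | some (b', w') => (b'.items, w'.items)
    | none => ([], [])  -- B's ValueError, excluded by Pre_

-- ===== PRECONDITION & SPEC =====
-- Pre_ excludes exactly the inputs on which A raises ValueError: a character that is neither a
-- digit nor a hand-piece letter, or a trailing run of digits with no piece letter after it.
def preOkChar (c : Char) : Bool :=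
  PySem.Chars.isdigit c || ['P','L','N','S','G','B','R'].contains (PySem.Chars.upperChar c)

def Pre_parse_hands (hands_part : String) : Prop :=
  hands_part = "-" ∨
    (hands_part.toList.all preOkChar = true ∧
     PySem.Chars.isdigit (hands_part.toList.getLastD 'P') = false)

instance (hands_part : String) : Decidable (Pre_parse_hands hands_part) := by
  unfold Pre_parse_hands; infer_instance

def pvWitness_parse_hands : String := "2Rb3p"

def Spec_parse_hands (hands_part : String) (out : (List (String × Int)) × (List (String × Int))) : Prop := out = parse_hands_alt hands_part
instance (hands_part : String) (out : (List (String × Int)) × (List (String × Int))) : Decidable (Spec_parse_hands hands_part out) := by unfold Spec_parse_hands; infer_instance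

-- ===== CLAIM (what is proved, stated in full; the proofs are below) =====
def Claim_equal_parse_hands : Prop := ∀ (hands_part : String), Dom_parse_hands hands_part → Pre_parse_hands hands_part → Spec_parse_hands hands_part (parse_hands hands_part)

-- ===== LEMMAS AND PROOFS =====

-- feeding a run of digits into loopB only appends them to the buffer
theorem loopB_digits (ds : List Char) (hds : ∀ c ∈ ds, PySem.Chars.isdigit c = true) :
    ∀ (rest buf : List Char) (b w : PySem.Dict String Int),
      loopB (ds ++ rest) buf b w = loopB rest (buf ++ ds) b w := by
  induction ds with
  | nil => intro rest buf b w; simp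
  | cons d ds ih =>
    intro rest buf b w
    have hd : PySem.Chars.isdigit d = true := hds d (by simp)
    rw [List.cons_append, loopB]
    simp only [hd, if_true]
    rw [ih (fun c hc => hds c (by simp [hc])) rest (buf ++ [d]) b w]
    simp

-- the two loops agree (strong induction on the length of the remaining characters)
theorem loopA_eq_loopB (n : Nat) : ∀ (cs : List Char), cs.length ≤ n →
    ∀ (b w : PySem.Dict String Int), loopA cs b w = loopB cs [] b w := by
  induction n with
  | zero =>
    intro cs hcs b w
    have : cs = [] := List.length_eq_zero_iff.mp (Nat.le_zero.mp hcs)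
    subst this; rw [loopA]; simp [loopB]
  | succ n ih =>
    intro cs hcs b w
    rcases cs with _ | ⟨c, cs'⟩
    · rw [loopA]; simp [loopB]
    · have hsplit := List.takeWhile_append_dropWhile (p := PySem.Chars.isdigit) (l := c :: cs')
      have hdig : ∀ x ∈ (c :: cs').takeWhile PySem.Chars.isdigit, PySem.Chars.isdigit x = true :=
        fun x hx => List.mem_takeWhile_imp hx
      rw [loopA]
      simp only [List.isEmpty_cons, Bool.false_eq_true, if_false]
      have hB : loopB (c :: cs') [] b w
          = loopB ((c :: cs').dropWhile PySem.Chars.isdigit)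
              ((c :: cs').takeWhile PySem.Chars.isdigit) b w := by
        conv_lhs => rw [← hsplit]
        rw [loopB_digits _ hdig]
        simp
      cases h2 : (c :: cs').dropWhile PySem.Chars.isdigit with
      | nil =>
        -- the whole remainder is digits: both loops fail (the buffer is the non-empty input)
        rw [hB, h2, loopB]
        have htk : (c :: cs').takeWhile PySem.Chars.isdigit = c :: cs' := by
          have := hsplit; rw [h2, List.append_nil] at this; exact this
        simp [htk]
      | cons pc tail =>
        have hlen : tail.length ≤ n := by
          have hle := List.length_dropWhile_le (p := PySem.Chars.isdigit) (l := c :: cs')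
          rw [h2] at hle; simp at hle hcs; omega
        have hpc : PySem.Chars.isdigit pc = false := by
          have := List.head_dropWhile_not (p := PySem.Chars.isdigit) (l := c :: cs')
            (w := by rw [h2]; simp)
          simp only [h2, List.head_cons] at this; exact this
        rw [hB, h2, loopB]
        simp only [hpc, Bool.false_eq_true, if_false]
        split_ifs
        all_goals first | exact ih tail hlen _ _ | rfl

-- ===== VERDICT (by name: the statement is the Claim_ definition above) =====
theorem parse_hands_spec : Claim_equal_parse_hands := by
  intro s _ _
  unfold Spec_parse_hands parse_hands parse_hands_alt
  by_cases h : s = "-" ∨ s = ""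
  · simp [h]
  · simp only [h, if_false]
    rw [loopA_eq_loopB s.toList.length s.toList (le_refl _)]
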